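-- pv_equiv track=rewrite | github.com/jlevy/flowmark | src/flowmark/linewrapping/block_heuristics.py | line_is_list_item
-- ===== SOURCE A (Python) =====
-- def line_is_list_item(line: str) -> bool:
--     """Quick check if a line looks like a list item."""
--     stripped = line.lstrip()
--     # Unordered: -, *, +
--     if stripped and stripped[0] in "-*+" and len(stripped) > 1 and stripped[1] in " \t":
--         return True
--     # Ordered: 1. or 1)
--     if stripped and stripped[0].isdigit():
--         i = 1
--         while i < len(stripped) and stripped[i].isdigit():
--             i += 1
--         if i < len(stripped) and stripped[i] in ".)" and i + 1 < len(stripped):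
--             return True
--     return False
-- ===== SOURCE B (Python) =====
-- def line_is_list_item(line: str) -> bool:
--     """Quick check if a line looks like a list item.
--
--     Single left-to-right pass driven by a small state machine: skip leading
--     whitespace, then either (bullet -> needs one space/tab) or
--     (digit run -> '.'/')' -> needs one more char of any kind).
--     """
--     WS, BULLET, DIGITS, PUNCT = 0, 1, 2, 3
--     state = WS
--     for ch in line:
--         if state == WS:
--             if ch.isspace():
--                 continue
--             if ch in "-*+":
--                 state = BULLET
--             elif ch.isdigit():
--                 state = DIGITS
--             else:
--                 return False
--         elif state == BULLET:
--             return ch in " \t"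
--         elif state == DIGITS:
--             if ch.isdigit():
--                 continue
--             if ch in ".)":
--                 state = PUNCT
--             else:
--                 return False
--         else:  # PUNCT: any further character completes an ordered item
--             return True
--     return False
-- ===== Notes on version B (the rewrite author's own statement) =====
-- stated objective: alternative
-- what changed: Replaces A's lstrip-then-branch structure (with an index-based while-scan over the digit run) by a single left-to-right pass over the raw line driven by a four-state finite state machine (skip-whitespace / after-bullet / digit-run / after-punctuation).
import Mathlib
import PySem

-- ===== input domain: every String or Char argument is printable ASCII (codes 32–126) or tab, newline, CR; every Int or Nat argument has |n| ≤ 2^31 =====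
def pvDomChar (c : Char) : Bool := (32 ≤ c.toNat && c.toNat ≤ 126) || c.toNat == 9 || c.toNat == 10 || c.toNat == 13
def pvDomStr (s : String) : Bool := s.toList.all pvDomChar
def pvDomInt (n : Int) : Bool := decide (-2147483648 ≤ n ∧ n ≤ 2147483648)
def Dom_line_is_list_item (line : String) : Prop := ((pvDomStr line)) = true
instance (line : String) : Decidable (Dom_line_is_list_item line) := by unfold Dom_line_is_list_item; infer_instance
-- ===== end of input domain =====

-- B replaces A's lstrip-then-branch scan by a single left-to-right pass over the
-- raw line driven by a four-state finite state machine (objective: alternative).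

-- ===== PORT A =====
-- the `while i < len(stripped) and stripped[i].isdigit(): i += 1` loop of A
def liliWhile (s : List Char) (i : Nat) : Nat :=
  if h : i < s.length then
    if PySem.Chars.isdigit s[i] then liliWhile s (i + 1) else i
  else i
termination_by s.length - i
decreasing_by omega

def line_is_list_item (line : String) : Bool :=
  let stripped := (PySem.Str.lstrip line).toList
  -- Unordered: -, *, +   (guarded indexing stripped[0] / stripped[1] via getElem?)
  if !stripped.isEmpty && (stripped[0]?.any (· ∈ ['-', '*', '+']))
      && decide (stripped.length > 1) && (stripped[1]?.any (· ∈ [' ', '\t'])) then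
    true
  -- Ordered: 1. or 1)
  else if !stripped.isEmpty && (stripped[0]?.any PySem.Chars.isdigit) then
    let i := liliWhile stripped 1
    if decide (i < stripped.length) && (stripped[i]?.any (· ∈ ['.', ')']))
        && decide (i + 1 < stripped.length) then
      true
    else false
  else false

-- ===== PORT B =====
-- the four states of Source B's machine (WS, BULLET, DIGITS, PUNCT)
inductive LiSt : Type
  | ws | bullet | digits | punct
deriving DecidableEq, Repr

-- the `for ch in line` loop of Source B with its early returns, as recursion on the chars
def liliDFA : LiSt → List Char → Bool
  | _, [] => false
  | .ws, c :: t =>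
      if PySem.Chars.isspace c then liliDFA .ws t
      else if c ∈ ['-', '*', '+'] then liliDFA .bullet t
      else if PySem.Chars.isdigit c then liliDFA .digits t
      else false
  | .bullet, c :: _ => c ∈ [' ', '\t']
  | .digits, c :: t =>
      if PySem.Chars.isdigit c then liliDFA .digits t
      else if c ∈ ['.', ')'] then liliDFA .punct t
      else false
  | .punct, _ :: _ => true

def line_is_list_item_alt (line : String) : Bool :=
  liliDFA .ws line.toList

-- ===== PRECONDITION & SPEC =====
def Spec_line_is_list_item (line : String) (out : Bool) : Prop := out = line_is_list_item_alt line
instance (line : String) (out : Bool) : Decidable (Spec_line_is_list_item line out) := by unfold Spec_line_is_list_item; infer_instance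

-- ===== CLAIM (what is proved, stated in full; the proofs are below) =====
def Claim_equal_line_is_list_item : Prop := ∀ (line : String), Dom_line_is_list_item line → Spec_line_is_list_item line (line_is_list_item line)

-- ===== LEMMAS AND PROOFS =====

-- B's WS state consumes exactly the leading whitespace that A's lstrip removes
theorem liliDFA_ws_dropWhile (s : List Char) :
    liliDFA .ws s = liliDFA .ws (s.dropWhile PySem.Chars.isspace) := by
  induction s with
  | nil => rfl
  | cons c t ih =>
    by_cases h : PySem.Chars.isspace c
    · rw [List.dropWhile_cons_of_pos h, liliDFA, if_pos h, ih]
    · rw [List.dropWhile_cons_of_neg h]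

-- B's PUNCT state accepts iff at least one character remains
theorem liliDFA_punct (t : List Char) : liliDFA .punct t = !t.isEmpty := by
  cases t <;> rfl

-- dropWhile lands where the takeWhile run ends
theorem dropWhile_eq_drop_len (p : Char → Bool) (l : List Char) :
    l.dropWhile p = l.drop (l.takeWhile p).length := by
  induction l with
  | nil => rfl
  | cons a l ih => by_cases h : p a <;> simp [h, ih]

-- B's DIGITS state, characterised by the digit-run remainder
theorem liliDFA_digits (t : List Char) :
    liliDFA .digits t =
      (((t.dropWhile PySem.Chars.isdigit).head?.any (· ∈ ['.', ')']))
        && decide ((t.dropWhile PySem.Chars.isdigit).length > 1)) := by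
  induction t with
  | nil => rfl
  | cons c t ih =>
    by_cases h : PySem.Chars.isdigit c
    · rw [List.dropWhile_cons_of_pos h]
      simpa [liliDFA, h] using ih
    · rw [List.dropWhile_cons_of_neg h]
      by_cases hp : c ∈ (['.', ')'] : List Char)
      · simp only [liliDFA, h, if_false, Bool.false_eq_true, hp, if_true, decide_true,
          List.head?_cons, Option.any_some, Bool.true_and, liliDFA_punct, List.length_cons]
        cases t <;> simp
      · simp only [liliDFA, h, Bool.false_eq_true, if_false, hp,
          List.head?_cons, Option.any_some]
        simp

-- A's while loop lands exactly past the takeWhile-digit run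
theorem liliWhile_eq (s : List Char) (i : Nat) (hi : i ≤ s.length) :
    liliWhile s i = i + ((s.drop i).takeWhile PySem.Chars.isdigit).length := by
  unfold liliWhile
  by_cases h : i < s.length
  · by_cases hd : PySem.Chars.isdigit s[i]
    · rw [dif_pos h, if_pos hd, liliWhile_eq s (i + 1) (by omega),
        List.drop_eq_getElem_cons h, List.takeWhile_cons, if_pos hd]
      simp only [List.length_cons]
      omega
    · rw [dif_pos h, if_neg hd, List.drop_eq_getElem_cons h, List.takeWhile_cons, if_neg hd]
      simp
  · have hle : s.length ≤ i := by omega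
    rw [dif_neg h, List.drop_eq_nil_of_le hle]
    simp

-- the ordered-item scan on the stripped list: A's index loop = B's DIGITS state
theorem digit_case (c0 : Char) (t : List Char) :
    (let i := liliWhile (c0 :: t) 1
     if decide (i < (c0 :: t).length) && ((c0 :: t)[i]?.any (· ∈ ['.', ')']))
        && decide (i + 1 < (c0 :: t).length) then true else false)
    = liliDFA .digits t := by
  rw [liliDFA_digits, dropWhile_eq_drop_len]
  have hk := liliWhile_eq (c0 :: t) 1 (by simp)
  simp only [List.drop_succ_cons, List.drop_zero] at hk
  dsimp only
  rw [hk]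
  set k := (t.takeWhile PySem.Chars.isdigit).length with hkdef
  have hkle : k ≤ t.length := (List.takeWhile_sublist _).length_le
  have hget : (c0 :: t)[1 + k]? = (t.drop k)[0]? := by
    rw [List.getElem?_drop]
    have h10 : 1 + k = (k + 0) + 1 := by omega
    rw [h10, List.getElem?_cons_succ]
    simp
  rw [hget, ← List.head?_eq_getElem?]
  by_cases h1 : k < t.length
  · have e1 : decide (1 + k < (c0 :: t).length) = true := by
      apply decide_eq_true; simp only [List.length_cons]; omega
    have e2 : decide (1 + k + 1 < (c0 :: t).length) = decide ((t.drop k).length > 1) := by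
      apply decide_eq_decide.mpr
      simp only [List.length_cons, List.length_drop]
      omega
    rw [e1, e2, Bool.true_and]
    cases hc : ((t.drop k).head?.any (· ∈ ['.', ')'])) &&
        decide ((t.drop k).length > 1) <;> simp
  · have hnil : t.drop k = [] := List.drop_eq_nil_of_le (by omega)
    have e1 : decide (1 + k < (c0 :: t).length) = false := by
      apply decide_eq_false; simp only [List.length_cons]; omega
    rw [hnil, e1]
    simp

-- the core equivalence on the stripped list (head is not whitespace)
theorem core_eq (s : List Char) (hs : ∀ c t, s = c :: t → PySem.Chars.isspace c = false) :
    (if !s.isEmpty && (s[0]?.any (· ∈ ['-', '*', '+']))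
        && decide (s.length > 1) && (s[1]?.any (· ∈ [' ', '\t'])) then
      true
    else if !s.isEmpty && (s[0]?.any PySem.Chars.isdigit) then
      let i := liliWhile s 1
      if decide (i < s.length) && (s[i]?.any (· ∈ ['.', ')']))
          && decide (i + 1 < s.length) then true else false
    else false)
    = liliDFA .ws s := by
  cases s with
  | nil => rfl
  | cons c0 t =>
    have hc0 : PySem.Chars.isspace c0 = false := hs c0 t rfl
    have hws : liliDFA .ws (c0 :: t) =
        (if c0 ∈ ['-', '*', '+'] then liliDFA .bullet t
         else if PySem.Chars.isdigit c0 then liliDFA .digits t else false) := by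
      rw [liliDFA, if_neg (by simp [hc0])]
    rw [hws]
    by_cases hb : c0 ∈ (['-', '*', '+'] : List Char)
    · rw [if_pos hb]
      have hd : PySem.Chars.isdigit c0 = false := by fin_cases hb <;> decide
      cases t with
      | nil =>
        rw [if_neg (by simp), if_neg (by simp [hd])]
        rfl
      | cons c1 t2 =>
        by_cases hsp : c1 ∈ ([' ', '\t'] : List Char)
        · rw [if_pos (by simp; exact ⟨by simpa using hb, by simpa using hsp⟩)]
          simp [liliDFA, hsp]
        · rw [if_neg (by simp; exact fun _ => by simpa [not_or] using hsp), if_neg (by simp [hd])]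
          simp [liliDFA, hsp]
    · rw [if_neg hb]
      by_cases hd : PySem.Chars.isdigit c0 = true
      · obtain ⟨h1, h2, h3⟩ : ¬c0 = '-' ∧ ¬c0 = '*' ∧ ¬c0 = '+' := by
          simpa [not_or] using hb
        rw [if_pos hd, ← digit_case c0 t]
        simp [hd, h1, h2, h3]
      · have hd' : PySem.Chars.isdigit c0 = false := by simpa using hd
        obtain ⟨h1, h2, h3⟩ : ¬c0 = '-' ∧ ¬c0 = '*' ∧ ¬c0 = '+' := by
          simpa [not_or] using hb
        simp [hd', h1, h2, h3]

-- ===== VERDICT (by name: the statement is the Claim_ definition above) =====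
theorem line_is_list_item_spec : Claim_equal_line_is_list_item := by
  intro line _
  unfold Spec_line_is_list_item line_is_list_item line_is_list_item_alt
  rw [liliDFA_ws_dropWhile, PySem.Str.toList_lstrip]
  show _ = liliDFA .ws (List.dropWhile PySem.Chars.isspace line.toList)
  exact core_eq _ (fun c t h => by
    have hh := List.head?_dropWhile_not PySem.Chars.isspace line.toList
    simp only [PySem.Chars.lstrip] at h
    rw [h] at hh
    simpa using hh)
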